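-- pv_equiv track=rewrite | github.com/Prabhuomkar9/LeetCode | src/python/_2482_Difference_Between_Ones_and_Zeros_in_Row_and_Column.py | onesMinusZeros
-- ===== SOURCE A (Python) =====
-- from typing import List
--
-- def onesMinusZeros(grid: List[List[int]]) -> List[List[int]]:
--     row = [0] * len(grid)
--     col = [0] * len(grid[0])
--
--     for i in range(len(grid)):
--         for j in range(len(grid[0])):
--             row[i] += grid[i][j]
--             col[j] += grid[i][j]
--
--     return [
--         [
--             2 * row[i] + 2 * col[j] - len(grid) - len(grid[0])
--             for j in range(len(grid[0]))
--         ]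
--         for i in range(len(grid))
--     ]
-- ===== SOURCE B (Python) =====
-- from typing import List
--
-- def onesMinusZeros(grid: List[List[int]]) -> List[List[int]]:
--     m, n = len(grid), len(grid[0])
--
--     # Single recursive descent-ascent: column totals are accumulated on the way
--     # down the rows; once the bottom is reached the finished totals are threaded
--     # back up, and each output row is built on the way back.
--     def go(rows, cols):
--         if not rows:
--             return cols, []
--         r = rows[0]
--         total, rest = go(rows[1:], [c + r[j] for j, c in enumerate(cols)])
--         s = sum(r[j] for j in range(n))
--         return total, [[2 * s + 2 * c - m - n for c in total]] + rest
--
--     return go(grid, [0] * n)[1]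
-- ===== Notes on version B (the rewrite author's own statement) =====
-- stated objective: alternative
-- what changed: replaces A's iterative nested index loop filling two mutable accumulator arrays plus a separate comprehension rebuild by a single recursive descent-ascent over the rows: column totals are threaded down the recursion and the output rows are constructed on the way back up from the finished totals
import Mathlib
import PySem

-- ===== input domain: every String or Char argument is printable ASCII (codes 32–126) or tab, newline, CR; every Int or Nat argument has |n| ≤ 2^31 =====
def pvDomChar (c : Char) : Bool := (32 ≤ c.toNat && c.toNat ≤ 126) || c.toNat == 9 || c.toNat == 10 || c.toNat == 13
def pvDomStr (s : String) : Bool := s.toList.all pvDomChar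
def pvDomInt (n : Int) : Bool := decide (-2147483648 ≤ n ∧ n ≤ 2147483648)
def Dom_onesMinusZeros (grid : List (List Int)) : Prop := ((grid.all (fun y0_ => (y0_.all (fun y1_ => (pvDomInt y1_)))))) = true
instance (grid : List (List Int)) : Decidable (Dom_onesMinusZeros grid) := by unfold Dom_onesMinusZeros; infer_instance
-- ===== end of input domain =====

-- B replaces A's iterative nested index loop over two mutable accumulator arrays by one
-- recursive descent-ascent over the rows: column totals are threaded down the recursion
-- and the output rows are built on the way back up (alternative decomposition; no speed claim).

-- ===== PORT A =====
-- literal port of A: row/col accumulators updated in one nested loop over (i, j),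
-- then the output built by indexed comprehension.  Under Pre_ every getD is in range.
def onesMinusZeros (grid : List (List Int)) : List (List Int) :=
  let m := grid.length
  let n := (grid.getD 0 []).length
  let rc :=
    (List.range m).foldl
      (fun rc i =>
        (List.range n).foldl
          (fun rc j =>
            (rc.1.set i (rc.1.getD i 0 + (grid.getD i []).getD j 0),
             rc.2.set j (rc.2.getD j 0 + (grid.getD i []).getD j 0)))
          rc)
      (List.replicate m (0 : Int), List.replicate n (0 : Int))
  (List.range m).map (fun i =>
    (List.range n).map (fun j =>
      2 * rc.1.getD i 0 + 2 * rc.2.getD j 0 - (m : Int) - (n : Int)))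

-- ===== PORT B =====
-- literal port of Source B's inner recursive `go`: descend over the remaining rows threading
-- the column accumulator; the bottom returns the finished totals, each level builds its
-- output row from them on the way back up.
def goAlt (m n : Nat) (rows : List (List Int)) (cols : List Int) :
    List Int × List (List Int) :=
  match rows with
  | [] => (cols, [])
  | r :: rs =>
    let p := goAlt m n rs (cols.zipIdx.map (fun jc => jc.1 + r.getD jc.2 0))
    let s := ((List.range n).map (fun j => r.getD j 0)).sum
    (p.1, (p.1.map (fun c => 2 * s + 2 * c - (m : Int) - (n : Int))) :: p.2)

def onesMinusZeros_alt (grid : List (List Int)) : List (List Int) :=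
  let m := grid.length
  let n := (grid.getD 0 []).length
  (goAlt m n grid (List.replicate n (0 : Int))).2

-- ===== PRECONDITION & SPEC =====
-- Pre_ excludes exactly the inputs where the Python raises IndexError: the empty grid
-- (grid[0]) and ragged grids with a row shorter than the first row (grid[i][j]).
def Pre_onesMinusZeros (grid : List (List Int)) : Prop :=
  grid ≠ [] ∧ ∀ r ∈ grid, (grid.getD 0 []).length ≤ r.length
instance (grid : List (List Int)) : Decidable (Pre_onesMinusZeros grid) := by
  unfold Pre_onesMinusZeros; infer_instance
def pvWitness_onesMinusZeros : List (List Int) := [[1, 0], [0, 1]]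

def Spec_onesMinusZeros (grid : List (List Int)) (out : List (List Int)) : Prop := out = onesMinusZeros_alt grid
instance (grid : List (List Int)) (out : List (List Int)) : Decidable (Spec_onesMinusZeros grid out) := by unfold Spec_onesMinusZeros; infer_instance

-- ===== CLAIM (what is proved, stated in full; the proofs are below) =====
def Claim_equal_onesMinusZeros : Prop := ∀ (grid : List (List Int)), Dom_onesMinusZeros grid → Pre_onesMinusZeros grid → Spec_onesMinusZeros grid (onesMinusZeros grid)

-- ===== LEMMAS AND PROOFS =====

-- small getD/set facts specific to the accumulator shape of port A
lemma getD_set_self (l : List Int) (i : Nat) (a : Int) (h : i < l.length) :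
    (l.set i a).getD i 0 = a := by simp [List.getD, h]

lemma getD_set_other (l : List Int) (i j : Nat) (a : Int) (h : i ≠ j) :
    (l.set i a).getD j 0 = l.getD j 0 := by simp [List.getD, h]

lemma set_getD_self (l : List Int) (i : Nat) : l.set i (l.getD i 0) = l := by
  apply List.ext_getElem?
  intro j
  by_cases h : i = j
  · subst h
    by_cases hl : i < l.length
    · simp [List.getD, hl]
    · simp [List.set_eq_of_length_le (Nat.le_of_not_lt hl)]
  · simp [List.getD, h]

-- sum of the first n entries of a row (both versions' row sum)
def rSum (n : Nat) (r : List Int) : Int := ((List.range n).map (fun j => r.getD j 0)).sum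

-- A's column accumulator after the inner loop over j < n for one row r
def colUpd (r : List Int) : Nat → List Int → List Int
  | 0, col => col
  | k + 1, col => (colUpd r k col).set k ((colUpd r k col).getD k 0 + r.getD k 0)

-- A's accumulator pair after the outer loop over the first m rows (definitionally
-- the fold inside port A when m = g.length)
def outerF (g : List (List Int)) (n m : Nat) : List Int × List Int :=
  (List.range m).foldl
    (fun rc i =>
      (List.range n).foldl
        (fun rc j =>
          (rc.1.set i (rc.1.getD i 0 + (g.getD i []).getD j 0),
           rc.2.set j (rc.2.getD j 0 + (g.getD i []).getD j 0)))
        rc)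
    (List.replicate g.length (0 : Int), List.replicate n (0 : Int))

lemma rSum_succ (n : Nat) (r : List Int) :
    rSum (n + 1) r = rSum n r + r.getD n 0 := by
  simp [rSum, List.range_succ]

lemma colUpd_length (r : List Int) (n : Nat) (col : List Int) :
    (colUpd r n col).length = col.length := by
  induction n with
  | zero => rfl
  | succ k ih => simp [colUpd, ih]

lemma colUpd_getD (r : List Int) (n : Nat) (col : List Int) (j : Nat) (hj : j < col.length) :
    (colUpd r n col).getD j 0 = col.getD j 0 + (if j < n then r.getD j 0 else 0) := by
  induction n with
  | zero => simp [colUpd]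
  | succ k ih =>
    show ((colUpd r k col).set k _).getD j 0 = _
    by_cases hk : j = k
    · subst hk
      rw [getD_set_self _ _ _ (by rw [colUpd_length]; exact hj), ih]
      simp
    · rw [getD_set_other _ _ _ _ (fun h => hk h.symm), ih]
      by_cases h : j < k
      · simp [h, Nat.lt_succ_of_lt h]
      · have h2 : ¬ j < k + 1 := by omega
        simp [h, h2]

lemma inner_eq (g : List (List Int)) (i n : Nat) (rc : List Int × List Int) :
    (List.range n).foldl
      (fun rc j =>
        (rc.1.set i (rc.1.getD i 0 + (g.getD i []).getD j 0),
         rc.2.set j (rc.2.getD j 0 + (g.getD i []).getD j 0)))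
      rc
    = (rc.1.set i (rc.1.getD i 0 + rSum n (g.getD i [])), colUpd (g.getD i []) n rc.2) := by
  induction n with
  | zero =>
    simp only [List.range_zero, List.foldl_nil, colUpd]
    rw [show rSum 0 (g.getD i []) = 0 by simp [rSum], add_zero, set_getD_self]
  | succ k ih =>
    rw [List.range_succ, List.foldl_append, ih]
    simp only [List.foldl_cons, List.foldl_nil, colUpd, rSum_succ]
    refine Prod.ext ?_ rfl
    by_cases hi : i < rc.1.length
    · show (rc.1.set i _).set i ((rc.1.set i _).getD i 0 + _) = _
      rw [getD_set_self _ _ _ (by simpa using hi), List.set_set, add_assoc]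
    · have h : rc.1.length ≤ i := Nat.le_of_not_lt hi
      rw [List.set_eq_of_length_le h, List.set_eq_of_length_le h, List.set_eq_of_length_le h]

lemma map_eq_range_getD {α β : Type} (l : List α) (d : α) (k : α → β) :
    l.map k = (List.range l.length).map (fun i => k (l.getD i d)) := by
  apply List.ext_getElem
  · simp
  · intro i h1 h2
    have hl : i < l.length := by simpa using h1
    simp [List.getD, List.getElem?_eq_getElem hl]

lemma outerF_succ (g : List (List Int)) (n k : Nat) :
    outerF g n (k + 1)
      = ((outerF g n k).1.set k ((outerF g n k).1.getD k 0 + rSum n (g.getD k [])),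
         colUpd (g.getD k []) n (outerF g n k).2) := by
  unfold outerF
  rw [List.range_succ, List.foldl_append]
  simp only [List.foldl_cons, List.foldl_nil]
  rw [inner_eq]

lemma outerF_fst_length (g : List (List Int)) (n m : Nat) :
    (outerF g n m).1.length = g.length := by
  induction m with
  | zero => simp [outerF]
  | succ k ih => rw [outerF_succ]; simp [ih]

lemma outerF_snd_length (g : List (List Int)) (n m : Nat) :
    (outerF g n m).2.length = n := by
  induction m with
  | zero => simp [outerF]
  | succ k ih => rw [outerF_succ]; simp [colUpd_length, ih]

lemma outerF_fst_getD (g : List (List Int)) (n m : Nat) (i : Nat) (hi : i < g.length) :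
    (outerF g n m).1.getD i 0 = if i < m then rSum n (g.getD i []) else 0 := by
  induction m with
  | zero => simp [outerF]
  | succ k ih =>
    rw [outerF_succ]
    by_cases hik : i = k
    · subst hik
      rw [getD_set_self _ _ _ (by rw [outerF_fst_length]; exact hi), ih]
      simp
    · rw [getD_set_other _ _ _ _ (fun h => hik h.symm), ih]
      by_cases h : i < k
      · simp [h, Nat.lt_succ_of_lt h]
      · have h2 : ¬ i < k + 1 := by omega
        simp [h, h2]

lemma outerF_snd_getD (g : List (List Int)) (n m : Nat) (j : Nat) (hj : j < n) :
    (outerF g n m).2.getD j 0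
      = ((List.range m).map (fun i => (g.getD i []).getD j 0)).sum := by
  induction m with
  | zero => simp [outerF]
  | succ k ih =>
    rw [outerF_succ, colUpd_getD _ _ _ _ (by rw [outerF_snd_length]; exact hj), ih]
    simp [List.range_succ, hj]

-- closed form of port A (its fold is definitionally outerF g n g.length)
lemma onesMinusZeros_eq_closed (g : List (List Int)) :
    onesMinusZeros g =
      (List.range g.length).map (fun i =>
        (List.range (g.getD 0 []).length).map (fun j =>
          2 * rSum (g.getD 0 []).length (g.getD i []) +
          2 * ((List.range g.length).map (fun i' => (g.getD i' []).getD j 0)).sum -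
          (g.length : Int) - ((g.getD 0 []).length : Int))) := by
  show (List.range g.length).map (fun i =>
      (List.range (g.getD 0 []).length).map (fun j =>
        2 * (outerF g (g.getD 0 []).length g.length).1.getD i 0
        + 2 * (outerF g (g.getD 0 []).length g.length).2.getD j 0
        - (g.length : Int) - ((g.getD 0 []).length : Int))) = _
  refine List.map_congr_left ?_
  intro i hi
  have hi' : i < g.length := List.mem_range.mp hi
  refine List.map_congr_left ?_
  intro j hj
  have hj' : j < (g.getD 0 []).length := List.mem_range.mp hj
  rw [outerF_fst_getD g _ _ i hi', outerF_snd_getD g _ _ j hj']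
  simp [hi']

-- ===== B-side lemmas =====

-- B's column accumulator as a left fold (the value threaded down the recursion)
def colAcc (rows : List (List Int)) (cols : List Int) : List Int :=
  rows.foldl (fun cs r => cs.zipIdx.map (fun jc => jc.1 + r.getD jc.2 0)) cols

lemma colStep_getD (cols r : List Int) (j : Nat) (hj : j < cols.length) :
    (cols.zipIdx.map (fun jc => jc.1 + r.getD jc.2 0)).getD j 0
      = cols.getD j 0 + r.getD j 0 := by
  have hj' : j < (cols.zipIdx.map (fun jc => jc.1 + r.getD jc.2 0)).length := by simp [hj]
  rw [List.getD_eq_getElem _ _ hj', List.getD_eq_getElem _ _ hj]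
  simp [List.getElem_zipIdx]

lemma colAcc_length (rows : List (List Int)) (cols : List Int) :
    (colAcc rows cols).length = cols.length := by
  induction rows generalizing cols with
  | nil => rfl
  | cons r rs ih =>
    show (colAcc rs (cols.zipIdx.map (fun jc => jc.1 + r.getD jc.2 0))).length = _
    rw [ih]; simp

lemma colAcc_getD (rows : List (List Int)) (cols : List Int) (j : Nat) (hj : j < cols.length) :
    (colAcc rows cols).getD j 0
      = cols.getD j 0 + (rows.map (fun r => r.getD j 0)).sum := by
  induction rows generalizing cols with
  | nil => simp [colAcc]
  | cons r rs ih =>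
    show (colAcc rs _).getD j 0 = _
    rw [ih _ (by simp [hj]), colStep_getD cols r j hj]
    simp [add_assoc]

-- closed form of B's recursion: the returned totals are colAcc, and the output rows are
-- built from those totals
lemma goAlt_eq (m n : Nat) (rows : List (List Int)) (cols : List Int) :
    goAlt m n rows cols
      = (colAcc rows cols,
         rows.map (fun r =>
           (colAcc rows cols).map (fun c => 2 * rSum n r + 2 * c - (m : Int) - (n : Int)))) := by
  induction rows generalizing cols with
  | nil => simp [goAlt, colAcc]
  | cons r rs ih =>
    have hca : colAcc (r :: rs) cols = colAcc rs (cols.zipIdx.map (fun jc => jc.1 + r.getD jc.2 0)) := rfl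
    simp only [goAlt, ih, hca, rSum, List.map_cons]

-- closed form of port B, matching A's
lemma onesMinusZeros_alt_eq_closed (g : List (List Int)) :
    onesMinusZeros_alt g =
      (List.range g.length).map (fun i =>
        (List.range (g.getD 0 []).length).map (fun j =>
          2 * rSum (g.getD 0 []).length (g.getD i []) +
          2 * ((List.range g.length).map (fun i' => (g.getD i' []).getD j 0)).sum -
          (g.length : Int) - ((g.getD 0 []).length : Int))) := by
  show (goAlt g.length (g.getD 0 []).length g
          (List.replicate (g.getD 0 []).length (0 : Int))).2 = _
  rw [goAlt_eq]
  set n := (g.getD 0 []).length with hn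
  have hlen : (colAcc g (List.replicate n (0 : Int))).length = n := by
    rw [colAcc_length]; simp
  rw [map_eq_range_getD g []
    (fun r => (colAcc g (List.replicate n (0 : Int))).map
       (fun c => 2 * rSum n r + 2 * c - (g.length : Int) - (n : Int)))]
  refine List.map_congr_left ?_
  intro i _
  rw [map_eq_range_getD (colAcc g (List.replicate n (0 : Int))) 0
    (fun c => 2 * rSum n (g.getD i []) + 2 * c - (g.length : Int) - (n : Int)), hlen]
  refine List.map_congr_left ?_
  intro j hj
  have hj' : j < n := List.mem_range.mp hj
  rw [colAcc_getD g _ j (by simp [hj'])]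
  rw [map_eq_range_getD g [] (fun r => r.getD j 0)]
  simp

-- ===== VERDICT (by name: the statement is the Claim_ definition above) =====
theorem onesMinusZeros_spec : Claim_equal_onesMinusZeros := by
  intro g _ _
  show onesMinusZeros g = onesMinusZeros_alt g
  rw [onesMinusZeros_eq_closed, onesMinusZeros_alt_eq_closed]
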